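-- pv_equiv track=rewrite | github.com/analytical1000-commits/GlobalSajuOS- | gsaju_kernel.py | _get_elements_balance
-- ===== SOURCE A (Python) =====
-- def _get_elements_balance(elements: dict) -> str:
--     """오행 균형 상태 텍스트 요약"""
--     sorted_el = sorted(elements.items(), key=lambda x: x[1], reverse=True)
--     strongest = sorted_el[0]
--     weakest   = sorted_el[-1]
--     zeros     = [k for k, v in elements.items() if v == 0]
--
--     lines = []
--     lines.append(f"가장 강한 오행: {strongest[0]}({strongest[1]})")
--     lines.append(f"가장 약한 오행: {weakest[0]}({weakest[1]})")
--     if zeros: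
--         lines.append(f"결핍 오행: {', '.join(zeros)}")
--     return " / ".join(lines)
-- ===== SOURCE B (Python) =====
-- def _get_elements_balance(elements: dict) -> str:
--     """One-pass version: track strongest (first max), weakest (last min) and zeros in a single loop."""
--     zeros = []
--     first = True
--     for k, v in elements.items():
--         if first:
--             sk, sv = k, v
--             wk, wv = k, v
--             first = False
--         else:
--             if v > sv:
--                 sk, sv = k, v
--             if v <= wv:
--                 wk, wv = k, v
--         if v == 0:
--             zeros.append(k)
--
--     lines = []
--     lines.append(f"가장 강한 오행: {sk}({sv})")
--     lines.append(f"가장 약한 오행: {wk}({wv})")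
--     if zeros:
--         lines.append(f"결핍 오행: {', '.join(zeros)}")
--     return " / ".join(lines)
-- ===== Notes on version B (the rewrite author's own statement) =====
-- stated objective: alternative
-- what changed: Replaces sorting all items and indexing sorted[0]/sorted[-1] by a single pass that tracks the first maximum, the last minimum and the zero-valued keys in one loop.
-- outside the precondition, e.g. on _get_elements_balance({}): A raises IndexError, B raises UnboundLocalError
import Mathlib
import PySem

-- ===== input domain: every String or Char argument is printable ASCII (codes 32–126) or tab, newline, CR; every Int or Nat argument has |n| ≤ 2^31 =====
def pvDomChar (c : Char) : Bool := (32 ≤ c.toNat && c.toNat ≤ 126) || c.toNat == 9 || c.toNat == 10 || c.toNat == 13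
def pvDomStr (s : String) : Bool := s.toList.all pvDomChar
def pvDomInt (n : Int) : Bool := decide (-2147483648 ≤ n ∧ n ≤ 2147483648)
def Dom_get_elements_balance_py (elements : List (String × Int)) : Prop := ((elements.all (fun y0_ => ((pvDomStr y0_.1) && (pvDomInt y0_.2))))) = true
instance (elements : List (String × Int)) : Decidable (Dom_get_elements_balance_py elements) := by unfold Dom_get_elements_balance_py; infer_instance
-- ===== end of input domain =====

-- B replaces A's sort-then-index by a single loop tracking first max, last min and zero keys (alternative decomposition, same result).

-- ===== PORT A =====
def get_elements_balance_py (elements : List (String × Int)) : String :=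
  let sorted_el := PySem.List.sorted elements (fun x => x.2) true
  match PySem.List.pyGet? sorted_el 0, PySem.List.pyGet? sorted_el (-1) with
  | some strongest, some weakest =>
    let zeros := (elements.filter (fun p => p.2 == 0)).map (fun p => p.1)
    let lines : List String := []
    let lines := lines ++ ["가장 강한 오행: " ++ strongest.1 ++ "(" ++ PySem.Int.toStr strongest.2 ++ ")"]
    let lines := lines ++ ["가장 약한 오행: " ++ weakest.1 ++ "(" ++ PySem.Int.toStr weakest.2 ++ ")"]
    let lines := if zeros ≠ [] then lines ++ ["결핍 오행: " ++ PySem.Str.join ", " zeros] else lines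
    PySem.Str.join " / " lines
  | _, _ => ""  -- unreachable under Pre_ (Python raises IndexError on an empty dict)

-- ===== PORT B =====
def get_elements_balance_py_alt (elements : List (String × Int)) : String :=
  match elements with
  | [] => ""  -- Source B raises UnboundLocalError here (outside Pre_)
  | e :: rest =>
    -- one pass: ((strongest, weakest), zeros); the 'first' iteration is the init state
    let st := rest.foldl
      (fun (acc : ((String × Int) × (String × Int)) × List String) kv =>
        ((if acc.1.1.2 < kv.2 then kv else acc.1.1,
          if kv.2 ≤ acc.1.2.2 then kv else acc.1.2),
         if kv.2 == 0 then acc.2 ++ [kv.1] else acc.2))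
      ((e, e), if e.2 == 0 then [e.1] else [])
    let s := st.1.1
    let w := st.1.2
    let zeros := st.2
    let lines : List String :=
      ["가장 강한 오행: " ++ s.1 ++ "(" ++ PySem.Int.toStr s.2 ++ ")",
       "가장 약한 오행: " ++ w.1 ++ "(" ++ PySem.Int.toStr w.2 ++ ")"]
    let lines := if zeros ≠ [] then lines ++ ["결핍 오행: " ++ PySem.Str.join ", " zeros] else lines
    PySem.Str.join " / " lines

-- ===== PRECONDITION & SPEC =====
-- Pre_ excludes only the empty dict, on which A raises IndexError (and B raises UnboundLocalError).
def Pre_get_elements_balance_py (elements : List (String × Int)) : Prop := elements ≠ []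
instance (elements : List (String × Int)) : Decidable (Pre_get_elements_balance_py elements) := by unfold Pre_get_elements_balance_py; infer_instance
def pvWitness_get_elements_balance_py : (List (String × Int)) := [("wood", 2), ("fire", 0)]

def Spec_get_elements_balance_py (elements : List (String × Int)) (out : String) : Prop := out = get_elements_balance_py_alt elements
instance (elements : List (String × Int)) (out : String) : Decidable (Spec_get_elements_balance_py elements out) := by unfold Spec_get_elements_balance_py; infer_instance

-- ===== CLAIM (what is proved, stated in full; the proofs are below) =====
def Claim_equal_get_elements_balance_py : Prop := ∀ (elements : List (String × Int)), Dom_get_elements_balance_py elements → Pre_get_elements_balance_py elements → Spec_get_elements_balance_py elements (get_elements_balance_py elements)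

-- ===== LEMMAS AND PROOFS =====

-- the insertion predicate of sorted(·, key=snd, reverse=True) and the descending-pairwise invariant
def pvBf (a b : String × Int) : Bool := decide (b.2 < a.2)
def pvDesc (a b : String × Int) : Prop := b.2 ≤ a.2

theorem pv_ins_ne_nil (x : String × Int) (l : List (String × Int)) :
    PySem.List.insertBy pvBf x l ≠ [] := by
  cases l with
  | nil => simp [PySem.List.insertBy]
  | cons y ys => simp only [PySem.List.insertBy]; split <;> simp

theorem pv_ins_head (x s : String × Int) (l : List (String × Int)) (h : l.head? = some s) :
    (PySem.List.insertBy pvBf x l).head? = some (if s.2 < x.2 then x else s) := by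
  cases l with
  | nil => simp at h
  | cons y ys =>
    simp only [List.head?_cons, Option.some.injEq] at h
    subst h
    simp only [PySem.List.insertBy, pvBf]
    split <;> rename_i hc <;> simp_all

theorem pv_getLast?_cons_ne_nil (y : String × Int) (m : List (String × Int)) (h : m ≠ []) :
    (y :: m).getLast? = m.getLast? := by
  cases m with
  | nil => exact absurd rfl h
  | cons a l => exact List.getLast?_cons_cons ..

theorem pv_ins_last (x : String × Int) (l : List (String × Int)) (w : String × Int)
    (hp : l.Pairwise pvDesc) (h : l.getLast? = some w) :
    (PySem.List.insertBy pvBf x l).getLast? = some (if x.2 ≤ w.2 then x else w) := by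
  induction l generalizing w with
  | nil => simp at h
  | cons y ys ih =>
    rw [List.pairwise_cons] at hp
    simp only [PySem.List.insertBy, pvBf]
    split <;> rename_i hc
    · -- y.2 < x.2 : x inserted here, last unchanged
      simp only [decide_eq_true_eq] at hc
      have hwy : w.2 ≤ y.2 := by
        cases ys with
        | nil => simp_all
        | cons z zs =>
          rw [List.getLast?_cons_cons] at h
          exact hp.1 w (List.mem_of_getLast? h)
      rw [if_neg (by omega), List.getLast?_cons_cons]
      exact h
    · cases ys with
      | nil =>
        simp only [List.getLast?_singleton, Option.some.injEq] at h
        subst h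
        simp only [decide_eq_true_eq, not_lt] at hc
        simp [PySem.List.insertBy, if_pos hc]
      | cons z zs =>
        rw [List.getLast?_cons_cons] at h
        have hrec := ih w hp.2 h
        rw [pv_getLast?_cons_ne_nil y _ (pv_ins_ne_nil x (z :: zs))]
        exact hrec

theorem pv_ins_pairwise (x : String × Int) (l : List (String × Int)) (hp : l.Pairwise pvDesc) :
    (PySem.List.insertBy pvBf x l).Pairwise pvDesc := by
  induction l with
  | nil => simp [PySem.List.insertBy]
  | cons y ys ih =>
    rw [List.pairwise_cons] at hp
    simp only [PySem.List.insertBy, pvBf]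
    split <;> rename_i hc
    · simp only [decide_eq_true_eq] at hc
      refine List.pairwise_cons.2 ⟨?_, List.pairwise_cons.2 hp⟩
      intro z hz
      rcases List.mem_cons.1 hz with rfl | hz
      · exact le_of_lt hc
      · exact le_trans (hp.1 z hz) (le_of_lt hc)
    · simp only [decide_eq_true_eq, not_lt] at hc
      refine List.pairwise_cons.2 ⟨?_, ih hp.2⟩
      intro z hz
      rcases (PySem.List.mem_insertBy _ _ _ _).1 hz with rfl | hz
      · exact hc
      · exact hp.1 z hz

theorem pv_fold_inv (rest : List (String × Int)) :
    ∀ (l : List (String × Int)) (s w : String × Int),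
      l.Pairwise pvDesc → l.head? = some s → l.getLast? = some w →
      (rest.foldl (fun acc x => PySem.List.insertBy pvBf x acc) l).Pairwise pvDesc ∧
      (rest.foldl (fun acc x => PySem.List.insertBy pvBf x acc) l).head? =
        some (rest.foldl (fun s x => if s.2 < x.2 then x else s) s) ∧
      (rest.foldl (fun acc x => PySem.List.insertBy pvBf x acc) l).getLast? =
        some (rest.foldl (fun w x => if x.2 ≤ w.2 then x else w) w) := by
  induction rest with
  | nil => intro l s w hp hs hw; exact ⟨hp, hs, hw⟩
  | cons x xs ih =>
    intro l s w hp hs hw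
    simp only [List.foldl_cons]
    exact ih _ _ _ (pv_ins_pairwise x l hp) (pv_ins_head x s l hs) (pv_ins_last x l w hp hw)

theorem pv_sorted_head_last (e : String × Int) (rest : List (String × Int)) :
    (PySem.List.sorted (e :: rest) (fun x => x.2) true).head? =
      some (rest.foldl (fun s x => if s.2 < x.2 then x else s) e) ∧
    (PySem.List.sorted (e :: rest) (fun x => x.2) true).getLast? =
      some (rest.foldl (fun w x => if x.2 ≤ w.2 then x else w) e) := by
  have hrw : PySem.List.sorted (e :: rest) (fun x => x.2) true =
      rest.foldl (fun acc x => PySem.List.insertBy pvBf x acc) [e] := by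
    rw [PySem.List.sorted_rev_eq_foldl_insertBy]
    simp only [List.foldl_cons]
    rfl
  have h := pv_fold_inv rest [e] e e (by simp [pvDesc]) (by simp) (by simp)
  rw [hrw]
  exact ⟨h.2.1, h.2.2⟩

-- ===== VERDICT (by name: the statement is the Claim_ definition above) =====
theorem get_elements_balance_py_spec : Claim_equal_get_elements_balance_py := by
  intro elements _ hpre
  unfold Spec_get_elements_balance_py
  cases elements with
  | nil => exact absurd rfl hpre
  | cons e rest =>
    have hhl := pv_sorted_head_last e rest
    -- A's zeros comprehension equals B's appended zeros accumulator
    have hz : (rest.foldl (fun (z : List String) kv => if kv.2 == 0 then z ++ [kv.1] else z)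
        (if e.2 == 0 then [e.1] else [])) =
        ((e :: rest).filter (fun p => p.2 == 0)).map (fun p => p.1) := by
      rw [show (if e.2 == 0 then [e.1] else ([] : List String)) =
            (if e.2 == 0 then [] ++ [e.1] else ([] : List String)) by simp,
          ← List.foldl_cons (f := fun (z : List String) (kv : String × Int) => if kv.2 == 0 then z ++ [kv.1] else z)]
      simpa using PySem.List.foldl_append_if (fun p : String × Int => p.2 == 0)
        (fun p => p.1) (e :: rest) []
    simp only [get_elements_balance_py, get_elements_balance_py_alt]
    -- split B's one-pass triple fold into three independent folds
    rw [PySem.List.foldl_prod_mk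
        (f := fun (p : (String × Int) × (String × Int)) kv =>
          (if p.1.2 < kv.2 then kv else p.1, if kv.2 ≤ p.2.2 then kv else p.2))
        (g := fun (z : List String) kv => if kv.2 == 0 then z ++ [kv.1] else z)]
    rw [PySem.List.foldl_prod_mk
        (f := fun (s : String × Int) kv => if s.2 < kv.2 then kv else s)
        (g := fun (w : String × Int) kv => if kv.2 ≤ w.2 then kv else w)]
    -- A's indexing sorted[0] / sorted[-1] is head? / getLast?
    rw [PySem.List.pyGet?_zero, PySem.List.pyGet?_neg_one, ← List.head?_eq_getElem?,
        hhl.1, hhl.2, hz]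
    rfl
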